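-- pv_equiv track=rewrite | github.com/VinhHung1999/memory-system-plugin | plugins/cmo/skills/positioning-statement-builder/scripts/three_circles.py | zone_items
-- ===== SOURCE A (Python) =====
-- def zone_items(sig_set, lookup_a, lookup_b=None, lookup_c=None):
--     """Resolve signature set back to display strings, preferring earlier sources."""
--     out = []
--     for sig in sig_set:
--         for src in (lookup_a, lookup_b, lookup_c):
--             if src and sig in src:
--                 out.append(src[sig])
--                 break
--     return sorted(out, key=str.lower)
-- ===== SOURCE B (Python) =====
-- def zone_items(sig_set, lookup_a, lookup_b=None, lookup_c=None):
--     """Resolve signature set back to display strings, preferring earlier sources."""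
--     merged = {}
--     for src in (lookup_a, lookup_b, lookup_c):
--         if src:
--             for key, value in src.items():
--                 merged.setdefault(key, value)
--     out = [merged[sig] for sig in sig_set if sig in merged]
--     return sorted(out, key=str.lower)
-- ===== Notes on version B (the rewrite author's own statement) =====
-- stated objective: alternative
-- what changed: Instead of scanning the three sources per signature with a break, B pre-merges the sources once into a single first-wins dict and then resolves each signature with one lookup over the merged dict.
import Mathlib
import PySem

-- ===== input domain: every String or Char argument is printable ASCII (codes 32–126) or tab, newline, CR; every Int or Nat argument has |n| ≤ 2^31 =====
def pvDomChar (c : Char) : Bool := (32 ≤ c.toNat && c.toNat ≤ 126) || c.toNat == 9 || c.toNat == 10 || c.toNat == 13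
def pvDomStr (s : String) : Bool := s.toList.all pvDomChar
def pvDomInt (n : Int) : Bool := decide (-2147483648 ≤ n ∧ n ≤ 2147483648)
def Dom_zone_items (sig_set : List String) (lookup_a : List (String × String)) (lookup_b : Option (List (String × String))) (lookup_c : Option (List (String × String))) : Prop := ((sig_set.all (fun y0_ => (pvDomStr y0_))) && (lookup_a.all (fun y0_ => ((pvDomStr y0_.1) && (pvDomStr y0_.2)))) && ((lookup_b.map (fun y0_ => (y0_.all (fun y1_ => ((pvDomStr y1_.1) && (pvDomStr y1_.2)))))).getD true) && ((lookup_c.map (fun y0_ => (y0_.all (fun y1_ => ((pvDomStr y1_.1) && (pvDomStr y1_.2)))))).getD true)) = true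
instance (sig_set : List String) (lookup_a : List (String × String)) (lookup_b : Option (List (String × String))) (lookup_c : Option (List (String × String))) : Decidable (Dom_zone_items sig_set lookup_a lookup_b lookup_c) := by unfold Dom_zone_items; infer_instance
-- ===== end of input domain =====

-- B replaces A's per-signature scan over the three sources (break on first hit) by a one-time
-- first-wins merge of the sources into a single dict followed by a flat lookup pass; same cost class.

-- ===== PORT A =====
-- 'if src and sig in src: out.append(src[sig]); break' for one source (None / empty dict are falsy)
def zaSrcHit (src : Option (List (String × String))) (sig : String) : Option String :=
  match src with
  | none => none
  | some d => if d.isEmpty then none else (PySem.Dict.mk d).get? sig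

def zone_items (sig_set : List String) (lookup_a : List (String × String)) (lookup_b : Option (List (String × String))) (lookup_c : Option (List (String × String))) : List String :=
  let out := sig_set.foldl (fun out sig =>
    match zaSrcHit (some lookup_a) sig with
    | some v => out ++ [v]
    | none =>
      match zaSrcHit lookup_b sig with
      | some v => out ++ [v]
      | none =>
        match zaSrcHit lookup_c sig with
        | some v => out ++ [v]
        | none => out) []
  PySem.List.sorted out PySem.Str.lower false

-- ===== PORT B =====
-- 'if src: for key, value in src.items(): merged.setdefault(key, value)' for one source
def zbMergeSrc (m : PySem.Dict String String) (src : Option (List (String × String))) : PySem.Dict String String :=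
  match src with
  | none => m
  | some d => if d.isEmpty then m else d.foldl (fun m kv => m.setdefault kv.1 kv.2) m

def zone_items_alt (sig_set : List String) (lookup_a : List (String × String)) (lookup_b : Option (List (String × String))) (lookup_c : Option (List (String × String))) : List String :=
  let merged := [some lookup_a, lookup_b, lookup_c].foldl zbMergeSrc PySem.Dict.empty
  let out := sig_set.filterMap (fun sig => merged.get? sig)
  PySem.List.sorted out PySem.Str.lower false

-- ===== PRECONDITION & SPEC =====
def Spec_zone_items (sig_set : List String) (lookup_a : List (String × String)) (lookup_b : Option (List (String × String))) (lookup_c : Option (List (String × String))) (out : List String) : Prop := out = zone_items_alt sig_set lookup_a lookup_b lookup_c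
instance (sig_set : List String) (lookup_a : List (String × String)) (lookup_b : Option (List (String × String))) (lookup_c : Option (List (String × String))) (out : List String) : Decidable (Spec_zone_items sig_set lookup_a lookup_b lookup_c out) := by unfold Spec_zone_items; infer_instance

-- ===== CLAIM (what is proved, stated in full; the proofs are below) =====
def Claim_equal_zone_items : Prop := ∀ (sig_set : List String) (lookup_a : List (String × String)) (lookup_b : Option (List (String × String))) (lookup_c : Option (List (String × String))), Dom_zone_items sig_set lookup_a lookup_b lookup_c → Spec_zone_items sig_set lookup_a lookup_b lookup_c (zone_items sig_set lookup_a lookup_b lookup_c)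

-- ===== LEMMAS AND PROOFS =====

-- lookup in a setdefault-fold: previous entries win, the new list acts as a first-match dict
theorem zb_get_foldl_setdefault (l : List (String × String)) (m : PySem.Dict String String) (k : String) :
    ((l.foldl (fun m kv => m.setdefault kv.1 kv.2) m).get? k) = (m.get? k).or ((PySem.Dict.mk l).get? k) := by
  induction l generalizing m with
  | nil => simp [PySem.Dict.get?]
  | cons p t ih =>
    obtain ⟨a, b⟩ := p
    simp only [List.foldl_cons, ih]
    by_cases hk : k = a
    · subst hk
      rw [PySem.Dict.get?_setdefault_self, PySem.Dict.get?_mk_cons]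
      cases h : m.get? k <;> simp
    · rw [PySem.Dict.get?_setdefault_of_ne m b hk, PySem.Dict.get?_mk_cons]
      simp [show (a == k) = false from beq_eq_false_iff_ne.mpr (fun h => hk h.symm)]

theorem zb_get_mergeSrc (m : PySem.Dict String String) (src : Option (List (String × String))) (k : String) :
    (zbMergeSrc m src).get? k = (m.get? k).or (zaSrcHit src k) := by
  cases src with
  | none => simp [zbMergeSrc, zaSrcHit]
  | some d =>
    simp only [zbMergeSrc, zaSrcHit]
    by_cases hd : d.isEmpty
    · simp [List.isEmpty_iff.mp hd, PySem.Dict.get?]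
    · simp [hd, zb_get_foldl_setdefault]

-- the merged dict resolves a signature exactly as A's break-on-first source chain does
theorem zb_merged_get (lookup_a : List (String × String)) (lookup_b lookup_c : Option (List (String × String))) (k : String) :
    (([some lookup_a, lookup_b, lookup_c].foldl zbMergeSrc PySem.Dict.empty).get? k)
      = ((zaSrcHit (some lookup_a) k).or ((zaSrcHit lookup_b k).or (zaSrcHit lookup_c k))) := by
  simp only [List.foldl_cons, List.foldl_nil, zb_get_mergeSrc, PySem.Dict.get?_empty]
  cases zaSrcHit (some lookup_a) k <;> cases zaSrcHit lookup_b k <;> simp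

-- A's append loop is a filterMap of the per-signature chain
theorem za_foldl_eq_filterMap (sig_set : List String) (f : String → Option String) (acc : List String) :
    (sig_set.foldl (fun out sig =>
      match f sig with
      | some v => out ++ [v]
      | none => out) acc) = acc ++ sig_set.filterMap f := by
  induction sig_set generalizing acc with
  | nil => simp
  | cons s t ih =>
    simp only [List.foldl_cons, List.filterMap_cons]
    cases h : f s <;> simp [ih]

-- ===== VERDICT (by name: the statement is the Claim_ definition above) =====
theorem zone_items_spec : Claim_equal_zone_items := by
  intro sig_set lookup_a lookup_b lookup_c _
  show zone_items sig_set lookup_a lookup_b lookup_c = zone_items_alt sig_set lookup_a lookup_b lookup_c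
  have h1 : (sig_set.foldl (fun out sig =>
      match zaSrcHit (some lookup_a) sig with
      | some v => out ++ [v]
      | none =>
        match zaSrcHit lookup_b sig with
        | some v => out ++ [v]
        | none =>
          match zaSrcHit lookup_c sig with
          | some v => out ++ [v]
          | none => out) [])
      = sig_set.filterMap
          (fun sig => ([some lookup_a, lookup_b, lookup_c].foldl zbMergeSrc PySem.Dict.empty).get? sig) := by
    have hc : (sig_set.foldl (fun out sig =>
        match zaSrcHit (some lookup_a) sig with
        | some v => out ++ [v]
        | none =>
          match zaSrcHit lookup_b sig with
          | some v => out ++ [v]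
          | none =>
            match zaSrcHit lookup_c sig with
            | some v => out ++ [v]
            | none => out) [])
        = sig_set.foldl (fun out sig =>
            match (zaSrcHit (some lookup_a) sig).or ((zaSrcHit lookup_b sig).or (zaSrcHit lookup_c sig)) with
            | some v => out ++ [v]
            | none => out) [] := by
      apply PySem.List.foldl_congr_mem
      intro acc sig _
      cases zaSrcHit (some lookup_a) sig <;> cases zaSrcHit lookup_b sig <;> cases zaSrcHit lookup_c sig <;> rfl
    rw [hc, za_foldl_eq_filterMap, List.nil_append]
    apply List.filterMap_congr
    intro sig _
    exact (zb_merged_get lookup_a lookup_b lookup_c sig).symm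
  unfold zone_items zone_items_alt
  rw [h1]
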